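-- pv_equiv track=rewrite | github.com/KhronosGroup/NNEF-Tools | nnef_tools/shape_inference/shape_inference.py | unsqueeze
-- ===== SOURCE A (Python) =====
-- def unsqueeze(input, axes):
--     # type: (ShapeType, AxisListType)->ShapeType
--     output_rank = len(input) + len(axes)
--     assert all(-output_rank <= axis < output_rank for axis in axes)
--     axes = sorted([axis if axis >= 0 else axis + output_rank for axis in axes])
--     output = list(input)
--     for axis in axes:
--         output.insert(axis, 1)
--     return output
-- ===== SOURCE B (Python) =====
-- def unsqueeze(input, axes):
--     output_rank = len(input) + len(axes)
--     assert all(-output_rank <= axis < output_rank for axis in axes)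
--     norm = sorted(axis if axis >= 0 else axis + output_rank for axis in axes)
--
--     def merge(inp, ax, k):
--         if not ax:
--             return list(inp)
--         if not inp or ax[0] <= k:
--             return [1] + merge(inp, ax[1:], k + 1)
--         return [inp[0]] + merge(inp[1:], ax, k + 1)
--
--     return merge(input, norm, 0)
-- ===== Notes on version B (the rewrite author's own statement) =====
-- stated objective: alternative
-- what changed: Replaces A's loop of repeated list.insert calls (each shifting a suffix) by a single forward two-pointer merge of the input dims with the sorted normalized axes, emitting 1 when the next axis position is due.
import Mathlib
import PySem

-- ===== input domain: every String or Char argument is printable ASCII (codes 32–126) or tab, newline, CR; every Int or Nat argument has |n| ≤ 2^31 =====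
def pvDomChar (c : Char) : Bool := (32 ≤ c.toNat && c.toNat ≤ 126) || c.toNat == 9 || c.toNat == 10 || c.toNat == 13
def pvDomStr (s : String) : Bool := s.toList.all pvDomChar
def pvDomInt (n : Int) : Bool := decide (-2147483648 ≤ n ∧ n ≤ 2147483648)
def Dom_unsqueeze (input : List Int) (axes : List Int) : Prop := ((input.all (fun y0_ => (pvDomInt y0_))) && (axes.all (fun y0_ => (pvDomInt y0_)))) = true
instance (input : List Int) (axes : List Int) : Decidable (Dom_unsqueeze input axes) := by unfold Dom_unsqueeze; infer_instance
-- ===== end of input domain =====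

-- B replaces A's repeated list.insert (quadratic shifting) by a single forward merge of the
-- input dims with the sorted normalized axes (objective: alternative single-pass construction).


-- ===== PORT A =====
-- literal port of A: normalize axes, sort, then repeatedly Python-insert 1.
-- (A's assert is captured by Pre_unsqueeze below; the port's value is only claimed inside it.)
def unsqueeze (input : List Int) (axes : List Int) : List Int :=
  let output_rank : Int := (input.length : Int) + (axes.length : Int)
  let axes' := PySem.List.sorted (axes.map (fun axis => if axis ≥ 0 then axis else axis + output_rank)) (fun x => x) false
  axes'.foldl (fun output axis => PySem.List.insert output axis 1) input

-- ===== PORT B =====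
-- Source B's recursive merge: walk the output positions, emitting 1 when the next sorted axis
-- is due (or the input is exhausted), else the next input dim.
def pvMerge (inp : List Int) (ax : List Int) (k : Int) : List Int :=
  match ax, inp with
  | [], _ => inp
  | _ :: rest, [] => 1 :: pvMerge [] rest (k + 1)
  | a :: rest, x :: xs =>
    if a ≤ k then 1 :: pvMerge (x :: xs) rest (k + 1)
    else x :: pvMerge xs (a :: rest) (k + 1)
termination_by inp.length + ax.length

def unsqueeze_alt (input : List Int) (axes : List Int) : List Int :=
  let output_rank : Int := (input.length : Int) + (axes.length : Int)
  let norm := PySem.List.sorted (axes.map (fun axis => if axis ≥ 0 then axis else axis + output_rank)) (fun x => x) false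
  pvMerge input norm 0

-- ===== PRECONDITION & SPEC =====
-- Pre_ excludes exactly the inputs on which A's assert fails (AssertionError): some axis
-- outside [-output_rank, output_rank). B raises the same assert there.
def Pre_unsqueeze (input : List Int) (axes : List Int) : Prop :=
  ∀ axis ∈ axes, -((input.length : Int) + (axes.length : Int)) ≤ axis ∧
    axis < (input.length : Int) + (axes.length : Int)
instance (input : List Int) (axes : List Int) : Decidable (Pre_unsqueeze input axes) := by
  unfold Pre_unsqueeze; infer_instance

def pvWitness_unsqueeze : List Int × List Int := ([3, 4], [0, -1])

def Spec_unsqueeze (input : List Int) (axes : List Int) (out : List Int) : Prop := out = unsqueeze_alt input axes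
instance (input : List Int) (axes : List Int) (out : List Int) : Decidable (Spec_unsqueeze input axes out) := by unfold Spec_unsqueeze; infer_instance

-- ===== CLAIM (what is proved, stated in full; the proofs are below) =====
def Claim_equal_unsqueeze : Prop := ∀ (input : List Int) (axes : List Int), Dom_unsqueeze input axes → Pre_unsqueeze input axes → Spec_unsqueeze input axes (unsqueeze input axes)

-- ===== LEMMAS AND PROOFS =====

-- Python insert at a nonnegative position: take/drop at (min i len)
theorem pv_insert_nonneg {α : Type} (xs : List α) (i : Int) (v : α) (h : 0 ≤ i) :
    PySem.List.insert xs i v =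
      xs.take (min i (xs.length : Int)).toNat ++ v :: xs.drop (min i (xs.length : Int)).toNat := by
  simp only [PySem.List.insert, PySem.List.sliceIndices]
  norm_num
  rw [if_neg (by omega : ¬ i < 0)]

theorem pv_insert_nil {α : Type} (i : Int) (v : α) (h : 0 ≤ i) :
    PySem.List.insert ([] : List α) i v = [v] := by
  rw [pv_insert_nonneg _ _ _ h]; simp

theorem pv_insert_cons_pos {α : Type} (x : α) (l : List α) (i : Int) (v : α) (h : 1 ≤ i) :
    PySem.List.insert (x :: l) i v = x :: PySem.List.insert l (i - 1) v := by
  rw [pv_insert_nonneg _ _ _ (by omega : (0:Int) ≤ i),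
      pv_insert_nonneg _ _ _ (by omega : (0:Int) ≤ i - 1)]
  have h1 : (min i ((x :: l).length : Int)).toNat = (min (i - 1) ((l.length : Int))).toNat + 1 := by
    simp only [List.length_cons]; omega
  rw [h1]
  simp [List.take_succ_cons, List.drop_succ_cons]

-- inserting the same value 1 past a head 1 commutes with consing the 1
theorem pv_insert_one_head (l : List Int) (a k : Int) :
    PySem.List.insert (1 :: l) (max (a - k) 0) 1 = 1 :: PySem.List.insert l (max (a - (k + 1)) 0) 1 := by
  by_cases hak : a ≤ k
  · have h1 : max (a - k) 0 = 0 := by omega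
    have h2 : max (a - (k + 1)) 0 = 0 := by omega
    rw [h1, h2, pv_insert_nonneg _ _ _ le_rfl, pv_insert_nonneg _ _ _ le_rfl]
    have h3 : (min (0:Int) (((1 :: l : List Int)).length : Int)).toNat = 0 := by
      simp only [List.length_cons]; omega
    have h4 : (min (0:Int) ((l.length : Int))).toNat = 0 := by omega
    rw [h3, h4]
    simp
  · have h1 : (1:Int) ≤ max (a - k) 0 := by omega
    rw [pv_insert_cons_pos _ _ _ _ h1]
    congr 1
    congr 1
    omega

-- fold with a leading 1 peels off, shifting the offset
theorem pv_foldl_one_cons (rest : List Int) : ∀ (inp : List Int) (k : Int),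
    rest.foldl (fun out a => PySem.List.insert out (max (a - k) 0) 1) (1 :: inp) =
      1 :: rest.foldl (fun out a => PySem.List.insert out (max (a - (k + 1)) 0) 1) inp := by
  induction rest with
  | nil => intro inp k; simp
  | cons b bs ih =>
    intro inp k
    simp only [List.foldl_cons]
    rw [pv_insert_one_head]
    exact ih _ _

-- when every axis is still ahead, the head input dim passes through the whole fold
theorem pv_foldl_head_pass (ax : List Int) : ∀ (x : Int) (xs : List Int) (k : Int),
    (∀ a ∈ ax, k + 1 ≤ a) →
    ax.foldl (fun out a => PySem.List.insert out (max (a - k) 0) 1) (x :: xs) =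
      x :: ax.foldl (fun out a => PySem.List.insert out (max (a - (k + 1)) 0) 1) xs := by
  induction ax with
  | nil => intro x xs k _; simp
  | cons b bs ih =>
    intro x xs k hall
    have hb : k + 1 ≤ b := hall b (by simp)
    simp only [List.foldl_cons]
    rw [pv_insert_cons_pos _ _ _ _ (by omega : (1:Int) ≤ max (b - k) 0)]
    have he : max (b - k) 0 - 1 = max (b - (k + 1)) 0 := by omega
    rw [he]
    exact ih x _ k (fun a ha => hall a (List.mem_cons_of_mem _ ha))

-- the merge equals the fold of offset inserts, for sorted axes
theorem pv_merge_eq_foldl (inp ax : List Int) (k : Int) (hs : ax.Pairwise (· ≤ ·)) :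
    pvMerge inp ax k =
      ax.foldl (fun out a => PySem.List.insert out (max (a - k) 0) 1) inp := by
  fun_induction pvMerge inp ax k with
  | case1 inp k => simp
  | case2 k a rest ih =>
    have hs' : rest.Pairwise (· ≤ ·) := (List.pairwise_cons.mp hs).2
    simp only [List.foldl_cons]
    rw [pv_insert_nil _ _ (by omega : (0:Int) ≤ max (a - k) 0)]
    rw [pv_foldl_one_cons rest [] k, ih hs']
  | case3 k a rest x xs hle ih =>
    have hs' : rest.Pairwise (· ≤ ·) := (List.pairwise_cons.mp hs).2
    simp only [List.foldl_cons]
    have h0 : max (a - k) 0 = 0 := by omega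
    rw [h0, PySem.List.insert_zero]
    rw [pv_foldl_one_cons rest (x :: xs) k, ih hs']
  | case4 k a rest x xs hgt ih =>
    have hall : ∀ b ∈ a :: rest, k + 1 ≤ b := by
      intro b hb
      rcases List.mem_cons.mp hb with h | h
      · omega
      · have := (List.pairwise_cons.mp hs).1 b h; omega
    rw [pv_foldl_head_pass (a :: rest) x xs k hall, ih hs]

-- ===== VERDICT (by name: the statement is the Claim_ definition above) =====
theorem unsqueeze_spec : Claim_equal_unsqueeze := by
  intro input axes _hdom hpre
  unfold Spec_unsqueeze unsqueeze unsqueeze_alt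
  set R : Int := (input.length : Int) + (axes.length : Int) with hR
  set norm := PySem.List.sorted (axes.map (fun axis => if axis ≥ 0 then axis else axis + R)) (fun x => x) false with hnorm
  have hs : norm.Pairwise (· ≤ ·) := PySem.List.sorted_pairwise _ _
  have hmem : ∀ a ∈ norm, 0 ≤ a := by
    intro a ha
    rw [hnorm, PySem.List.mem_sorted] at ha
    rcases List.mem_map.mp ha with ⟨axis, haxis, heq⟩
    have hb := hpre axis haxis
    by_cases h : axis ≥ 0 <;> simp [h] at heq <;> omega
  rw [pv_merge_eq_foldl input norm 0 hs]
  symm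
  apply PySem.List.foldl_congr_mem
  intro acc a ha
  have h0 := hmem a ha
  have he : max (a - 0) 0 = a := by omega
  rw [he]
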